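-- pv_equiv track=rewrite | github.com/skdharma05/DSA | Arrays/Easy/leftRotateArrayByDPlace.py | leftRotateArrayByDPlace
-- ===== SOURCE A (Python) =====
-- def leftRotateArrayByDPlace(arr, d):
--     n = len(arr)
--     d = d%n
--     def reverse(start,end):
--         while start<end:
--             arr[start],arr[end] = arr[end],arr[start]
--             start+=1
--             end-=1
--
--     reverse(0,d-1) #[1,2,3,4,5,6,7] -> [2,1,3,4,5,6,7]
--     reverse(d,n-1) #[2,1,3,4,5,6,7] -> [2,1,7,6,5,4,3]
--     reverse(0,n-1) #[2,1,7,6,5,4,3] -> [3,4,5,6,7,1,2]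
--
--     return arr
-- ===== SOURCE B (Python) =====
-- def leftRotateArrayByDPlace(arr, d):
--     d = d % len(arr)
--     arr[:] = arr[d:] + arr[:d]
--     return arr
-- ===== Notes on version B (the rewrite author's own statement) =====
-- stated objective: idiomatic
-- what changed: Replaced the three-subrange-reversal rotation with a single slice-concatenation assignment arr[:] = arr[d:] + arr[:d] after reducing d modulo len(arr).
import Mathlib
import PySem

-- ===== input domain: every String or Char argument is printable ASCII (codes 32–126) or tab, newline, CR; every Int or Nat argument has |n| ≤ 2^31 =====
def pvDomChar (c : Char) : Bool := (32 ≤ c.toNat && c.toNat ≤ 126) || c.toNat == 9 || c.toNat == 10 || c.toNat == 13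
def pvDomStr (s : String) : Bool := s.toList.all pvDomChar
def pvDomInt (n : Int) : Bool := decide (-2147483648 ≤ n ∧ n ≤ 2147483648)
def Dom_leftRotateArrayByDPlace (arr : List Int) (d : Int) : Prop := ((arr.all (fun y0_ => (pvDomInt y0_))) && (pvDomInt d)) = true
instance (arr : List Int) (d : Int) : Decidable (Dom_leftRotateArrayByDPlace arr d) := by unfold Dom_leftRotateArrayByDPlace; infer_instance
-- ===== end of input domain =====

-- B replaces A's three in-place subrange reversals with a single slice-concatenation
-- rebuild (arr[d:] + arr[:d]); the equivalence proved here is about the RETURN value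
-- (both Pythons also mutate arr in place to the same content).

-- ===== PORT A =====
-- the inner 'reverse(start, end)' while-loop of A; the '| _, _ => xs' arm is only a
-- totality guard for out-of-range indices, never reached on the indices A uses
def pvRevLoop (xs : List Int) (s e : Int) : List Int :=
  if s < e then
    match PySem.List.pyGet? xs s, PySem.List.pyGet? xs e with
    | some a, some b =>
        pvRevLoop (PySem.List.pySetD (PySem.List.pySetD xs s b) e a) (s + 1) (e - 1)
    | _, _ => xs
  else xs
termination_by (e - s).toNat
decreasing_by omega

def leftRotateArrayByDPlace (arr : List Int) (d : Int) : List Int :=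
  let n : Int := arr.length
  let d' : Int := PySem.Int.mod d n
  let a1 := pvRevLoop arr 0 (d' - 1)
  let a2 := pvRevLoop a1 d' (n - 1)
  pvRevLoop a2 0 (n - 1)

-- ===== PORT B =====
def leftRotateArrayByDPlace_alt (arr : List Int) (d : Int) : List Int :=
  let d' : Int := PySem.Int.mod d (arr.length : Int)
  PySem.List.slice arr (some d') none ++ PySem.List.slice arr none (some d')

-- ===== PRECONDITION & SPEC =====
-- Pre_ excludes only the empty list, on which A raises ZeroDivisionError (d % 0).
def Pre_leftRotateArrayByDPlace (arr : List Int) (d : Int) : Prop := arr ≠ []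
instance (arr : List Int) (d : Int) : Decidable (Pre_leftRotateArrayByDPlace arr d) := by
  unfold Pre_leftRotateArrayByDPlace; infer_instance

def pvWitness_leftRotateArrayByDPlace : List Int × Int := ([1, 2, 3, 4, 5], 2)

def Spec_leftRotateArrayByDPlace (arr : List Int) (d : Int) (out : List Int) : Prop := out = leftRotateArrayByDPlace_alt arr d
instance (arr : List Int) (d : Int) (out : List Int) : Decidable (Spec_leftRotateArrayByDPlace arr d out) := by unfold Spec_leftRotateArrayByDPlace; infer_instance

-- ===== CLAIM (what is proved, stated in full; the proofs are below) =====
def Claim_equal_leftRotateArrayByDPlace : Prop := ∀ (arr : List Int) (d : Int), Dom_leftRotateArrayByDPlace arr d → Pre_leftRotateArrayByDPlace arr d → Spec_leftRotateArrayByDPlace arr d (leftRotateArrayByDPlace arr d)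

-- ===== LEMMAS AND PROOFS =====

theorem list_set_len (A t : List Int) (x v : Int) : (A ++ x :: t).set A.length v = A ++ v :: t := by
  induction A with
  | nil => rfl
  | cons h tA ih => simp [ih]

theorem pvGet_mid (A t : List Int) (x : Int) :
    PySem.List.pyGet? (A ++ x :: t) (A.length : Int) = some x :=
  PySem.List.pyGet?_append_length A t x

theorem pvSet_mid (A t : List Int) (x v : Int) :
    PySem.List.pySetD (A ++ x :: t) (A.length : Int) v = A ++ v :: t := by
  rw [PySem.List.pySetD_natCast]; exact list_set_len A t x v

theorem pvRevLoop_main (n : Nat) : ∀ (M A C : List Int) (a b : Int), M.length = n →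
    pvRevLoop (A ++ (a :: (M ++ b :: C))) (A.length : Int) ((A.length : Int) + M.length + 1)
      = A ++ (b :: (M.reverse ++ a :: C)) := by
  induction n using Nat.strong_induction_on with
  | _ n ih =>
    intro M A C a b hlen
    rw [pvRevLoop]
    rw [if_pos (by omega)]
    have hAe : ((A ++ a :: M).length : Int) = (A.length : Int) + M.length + 1 := by
      simp; push_cast; ring
    have g1 : PySem.List.pyGet? (A ++ (a :: (M ++ b :: C))) (A.length : Int) = some a := by
      have := pvGet_mid A (M ++ b :: C) a
      simpa using this
    have g2 : PySem.List.pyGet? (A ++ (a :: (M ++ b :: C))) ((A.length : Int) + M.length + 1) = some b := by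
      rw [← hAe]
      have := pvGet_mid (A ++ a :: M) C b
      simpa using this
    rw [g1, g2]
    have s1 : PySem.List.pySetD (A ++ (a :: (M ++ b :: C))) (A.length : Int) b
        = A ++ (b :: (M ++ b :: C)) := pvSet_mid A (M ++ b :: C) a b
    have s2 : PySem.List.pySetD (A ++ (b :: (M ++ b :: C))) ((A.length : Int) + M.length + 1) a
        = A ++ (b :: (M ++ a :: C)) := by
      have hidx : (A.length : Int) + M.length + 1 = ((A ++ b :: M).length : Int) := by
        simp only [List.length_append, List.length_cons]; push_cast; ring
      rw [hidx]
      have h := pvSet_mid (A ++ b :: M) C b a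
      simp only [List.append_assoc, List.cons_append] at h
      exact h
    simp only [s1, s2]
    rcases M with _ | ⟨x, M1⟩
    · -- M = []
      rw [pvRevLoop, if_neg (by simp)]
      simp
    · rcases M1.eq_nil_or_concat' with h1 | ⟨M2, y, rfl⟩
      · -- M = [x]
        subst h1
        rw [pvRevLoop, if_neg (by simp)]
        simp
      · -- M = x :: M2 ++ [y]
        have hih := ih M2.length (by simp at hlen ⊢; omega) M2 (A ++ [b]) (a :: C) x y rfl
        have hidx : ((A ++ [b]).length : Int) = (A.length : Int) + 1 := by simp
        rw [hidx] at hih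
        have hidx2 : ((A.length : Int) + 1) + (M2.length : Int) + 1 = (A.length : Int) + (x :: (M2 ++ [y])).length + 1 - 1 := by
          simp; push_cast; ring
        rw [hidx2] at hih
        have hlist : (A ++ [b]) ++ (x :: (M2 ++ y :: (a :: C))) = A ++ (b :: ((x :: (M2 ++ [y])) ++ a :: C)) := by simp
        rw [hlist] at hih
        rw [hih]
        simp

theorem pvRevLoop_seg (P Q R : List Int) :
    pvRevLoop (P ++ (Q ++ R)) (P.length : Int) ((P.length : Int) + Q.length - 1)
      = P ++ (Q.reverse ++ R) := by
  rcases Q with _ | ⟨a, Q1⟩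
  · rw [pvRevLoop, if_neg (by simp)]
    simp
  · rcases Q1.eq_nil_or_concat' with h1 | ⟨M, b, rfl⟩
    · subst h1
      rw [pvRevLoop, if_neg (by simp)]
      simp
    · have h := pvRevLoop_main M.length M P R a b rfl
      simp only [List.append_assoc, List.cons_append, List.length_cons, List.length_append,
        List.reverse_cons, List.reverse_append, List.nil_append] at h ⊢
      have hidx : ((P.length : Int) + ↑(M.length + (([] : List Int).length + 1) + 1) - 1 : Int)
          = (P.length : Int) + M.length + 1 := by simp only [List.length_nil]; push_cast; omega
      rw [hidx]
      simpa using h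
theorem pvRotate_eq (arr : List Int) (d : Int) (hpre : arr ≠ []) :
    leftRotateArrayByDPlace arr d = leftRotateArrayByDPlace_alt arr d := by
  simp only [leftRotateArrayByDPlace, leftRotateArrayByDPlace_alt]
  have hn : 0 < (arr.length : Int) := by
    simpa [List.length_pos_iff] using hpre
  have h0 : 0 ≤ PySem.Int.mod d (arr.length : Int) := PySem.Int.mod_nonneg d hn
  have hlt : PySem.Int.mod d (arr.length : Int) < arr.length := PySem.Int.mod_lt d hn
  obtain ⟨k, hm⟩ : ∃ k : Nat, PySem.Int.mod d (arr.length : Int) = (k : Int) :=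
    ⟨(PySem.Int.mod d (arr.length : Int)).toNat, by omega⟩
  rw [hm] at hlt ⊢
  have hk : k < arr.length := by exact_mod_cast hlt
  -- B side: the two slices are drop/take
  rw [PySem.List.slice_from arr (by positivity), PySem.List.slice_to arr (by positivity)]
  rw [Int.toNat_natCast]
  -- phase 1: reverse the first k elements
  have hPlen : ((arr.take k).length : Int) = (k : Int) := by
    simp [List.length_take, Nat.min_eq_left (le_of_lt hk)]
  have e1 := pvRevLoop_seg [] (arr.take k) (arr.drop k)
  simp only [List.nil_append, List.length_nil, Nat.cast_zero, zero_add,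
    List.take_append_drop] at e1
  rw [hPlen] at e1
  -- phase 2: reverse the remaining elements
  have e2 := pvRevLoop_seg ((arr.take k).reverse) (arr.drop k) []
  simp only [List.append_nil, List.length_reverse] at e2
  rw [hPlen] at e2
  have hidx2 : (k : Int) + ((arr.drop k).length : Int) - 1 = (arr.length : Int) - 1 := by
    simp only [List.length_drop]
    omega
  rw [hidx2] at e2
  -- phase 3: reverse the whole list
  have e3 := pvRevLoop_seg [] ((arr.take k).reverse ++ (arr.drop k).reverse) []
  simp only [List.nil_append, List.append_nil, List.length_nil, Nat.cast_zero, zero_add,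
    List.length_append, List.length_reverse, List.reverse_append, List.reverse_reverse] at e3
  have hidx3 : (((arr.take k).length + (arr.drop k).length : Nat) : Int) - 1 = (arr.length : Int) - 1 := by
    simp only [List.length_take, List.length_drop]
    omega
  rw [hidx3] at e3
  have c1 := congrArg
    (fun t => pvRevLoop (pvRevLoop t ((k : Nat) : Int) ((arr.length : Int) - 1)) 0 ((arr.length : Int) - 1)) e1
  have c2 := congrArg (fun t => pvRevLoop t 0 ((arr.length : Int) - 1)) e2
  simp only [] at c1 c2
  exact (c1.trans c2).trans e3

-- ===== VERDICT (by name: the statement is the Claim_ definition above) =====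
theorem leftRotateArrayByDPlace_spec : Claim_equal_leftRotateArrayByDPlace := by
  intro arr d _ hpre
  unfold Spec_leftRotateArrayByDPlace
  exact pvRotate_eq arr d hpre
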